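-- pv_equiv track=rewrite | github.com/JaleelRadhu/RREF_scratch_implementation | Code/main.py | odr_mat
-- ===== SOURCE A (Python) =====
-- def cnt(l):
--     c=0
--     for i in l:
--         if i==0:
--             c+=1
--         else:
--             break
--     return c
--
-- def odr_mat(mtrx):
--     min0=0
--     fmtrx=[]
--     while mtrx!=[]:
--         i=0
--         while i <(len(mtrx)):
--             if cnt(mtrx[i])==min0:
--                 fmtrx.append(mtrx[i])
--                 mtrx.pop(i)
--             else:
--                 i+=1
--             if mtrx==[]:
--                 break
--         min0+=1
--     return fmtrx
-- ===== SOURCE B (Python) =====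
-- # Return-value equivalent to A; note A empties its argument in place, B leaves it intact.
-- def odr_mat(mtrx):
--     def lzc(row):
--         return next((i for i, x in enumerate(row) if x != 0), len(row))
--     return sorted(mtrx, key=lzc)
-- ===== Notes on version B (the rewrite author's own statement) =====
-- stated objective: idiomatic
-- what changed: A repeatedly scans the list with an index-and-pop pass per leading-zero count; B computes each row's first-nonzero index once and calls Python's stable sorted() with it as the key (A empties its argument in place, B does not; return values are equal).
import Mathlib
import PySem

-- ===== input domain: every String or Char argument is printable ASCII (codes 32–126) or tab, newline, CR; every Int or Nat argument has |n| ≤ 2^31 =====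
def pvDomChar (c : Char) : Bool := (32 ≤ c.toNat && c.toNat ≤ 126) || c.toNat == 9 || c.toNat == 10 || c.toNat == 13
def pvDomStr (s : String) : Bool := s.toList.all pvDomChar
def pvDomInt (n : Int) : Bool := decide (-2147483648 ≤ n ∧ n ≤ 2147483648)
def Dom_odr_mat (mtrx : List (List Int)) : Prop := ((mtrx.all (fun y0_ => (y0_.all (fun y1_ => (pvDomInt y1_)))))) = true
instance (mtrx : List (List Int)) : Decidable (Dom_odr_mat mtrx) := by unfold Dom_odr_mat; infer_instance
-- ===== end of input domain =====

-- B replaces A's repeated count-by-count scan-and-pop passes with one stable key-sort by the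
-- first-nonzero index (return values equal; A empties its argument in place, B does not).

-- ===== PORT A =====
-- cnt: c=0; for i in l: if i==0: c+=1 else: break
def cntA : List Int → Int
  | [] => 0
  | x :: xs => if x = 0 then cntA xs + 1 else 0

-- the inner `while i < len(mtrx)` of A: scan left to right; a row with cnt == min0 is
-- appended to fmtrx and popped (i stays), otherwise kept (i += 1).
-- Returned as (rows appended this pass, rows remaining), both in scan order.
def passA (min0 : Int) : List (List Int) → List (List Int) × List (List Int)
  | [] => ([], [])
  | r :: rest =>
    if cntA r = min0 then
      let p := passA min0 rest
      (r :: p.1, p.2)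
    else
      let p := passA min0 rest
      (p.1, r :: p.2)

-- the outer `while mtrx != []` of A.  The fuel (max row length + 1) is ONLY a totality
-- guard: after pass k every remaining row has cnt > k, and cnt never exceeds the row
-- length, so the loop always exits through its `cur = []` test before fuel runs out.
def outerA : Nat → Int → List (List Int) → List (List Int) → List (List Int)
  | 0, _, _, fmtrx => fmtrx
  | fuel + 1, min0, cur, fmtrx =>
    if cur = [] then fmtrx
    else outerA fuel (min0 + 1) (passA min0 cur).2 (fmtrx ++ (passA min0 cur).1)

def odr_mat (mtrx : List (List Int)) : List (List Int) :=
  outerA (mtrx.foldl (fun m r => max m r.length) 0 + 1) 0 mtrx []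

-- ===== PORT B =====
-- lzc(row) = next((i for i, x in enumerate(row) if x != 0), len(row))
def lzcB (row : List Int) : Int :=
  match (PySem.List.enumerate row).find? (fun p => decide (p.2 ≠ 0)) with
  | some p => p.1
  | none => (row.length : Int)

-- sorted(mtrx, key=lzc)
def odr_mat_alt (mtrx : List (List Int)) : List (List Int) :=
  PySem.List.sorted mtrx lzcB false

-- ===== PRECONDITION & SPEC =====
def Spec_odr_mat (mtrx : List (List Int)) (out : List (List Int)) : Prop := out = odr_mat_alt mtrx
instance (mtrx : List (List Int)) (out : List (List Int)) : Decidable (Spec_odr_mat mtrx out) := by unfold Spec_odr_mat; infer_instance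

-- ===== CLAIM (what is proved, stated in full; the proofs are below) =====
def Claim_equal_odr_mat : Prop := ∀ (mtrx : List (List Int)), Dom_odr_mat mtrx → Spec_odr_mat mtrx (odr_mat mtrx)

-- ===== LEMMAS AND PROOFS =====

theorem lzcB_aux (row : List Int) : ∀ s : Int,
    (match (PySem.List.enumerate row s).find? (fun p => decide (p.2 ≠ 0)) with
     | some p => p.1
     | none => s + (row.length : Int)) = s + cntA row := by
  induction row with
  | nil => intro s; simp [PySem.List.enumerate, cntA]
  | cons x xs ih =>
    intro s
    by_cases hx : x = 0
    · have := ih (s + 1)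
      simp [PySem.List.enumerate, cntA, hx] at this ⊢
      rw [show s + ((xs.length : Int) + 1) = s + 1 + (xs.length : Int) from by ring, this]
      ring
    · simp [PySem.List.enumerate, cntA, hx]

theorem lzcB_eq (row : List Int) : lzcB row = cntA row := by
  have := lzcB_aux row 0
  simpa [lzcB] using this

theorem cntA_nonneg (r : List Int) : 0 ≤ cntA r := by
  induction r with
  | nil => simp [cntA]
  | cons x xs ih =>
    by_cases hx : x = 0
    · simp [cntA, hx]; omega
    · simp [cntA, hx]

theorem cntA_le_length (r : List Int) : cntA r ≤ (r.length : Int) := by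
  induction r with
  | nil => simp [cntA]
  | cons x xs ih =>
    by_cases hx : x = 0
    · simp [cntA, hx]; omega
    · simp [cntA, hx]; omega

theorem passA_eq (k : Int) (l : List (List Int)) :
    passA k l = (l.filter (fun r => decide (cntA r = k)),
                 l.filter (fun r => decide (cntA r ≠ k))) := by
  induction l with
  | nil => simp [passA]
  | cons r rest ih =>
    by_cases h : cntA r = k <;> simp [passA, h, ih]

theorem insertBy_append_of_not_before (bf : List Int → List Int → Bool) (x : List Int)
    (as bs : List (List Int)) (h : ∀ a ∈ as, bf x a = false) :
    PySem.List.insertBy bf x (as ++ bs) = as ++ PySem.List.insertBy bf x bs := by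
  induction as with
  | nil => simp
  | cons a as' ih =>
    have ha : bf x a = false := h a (by simp)
    simp only [List.cons_append, PySem.List.insertBy, ha]
    simp [ih (fun a h' => h a (by simp [h']))]

theorem insertBy_all_before (bf : List Int → List Int → Bool) (x : List Int)
    (bs : List (List Int)) (h : ∀ b ∈ bs, bf x b = true) :
    PySem.List.insertBy bf x bs = x :: bs := by
  cases bs with
  | nil => simp [PySem.List.insertBy]
  | cons b bs' => simp [PySem.List.insertBy, h b (by simp)]

theorem sorted_snoc (ys : List (List Int)) (x : List Int) (key : List Int → Int) :
    PySem.List.sorted (ys ++ [x]) key false =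
      PySem.List.insertBy (fun a b => decide (key a < key b)) x (PySem.List.sorted ys key false) := by
  rw [PySem.List.sorted_eq_foldl_insertBy, PySem.List.sorted_eq_foldl_insertBy, List.foldl_append]
  rfl

theorem sorted_min_split (key : List Int → Int) (k : Int) (l : List (List Int))
    (hk : ∀ r ∈ l, k ≤ key r) :
    PySem.List.sorted l key false =
      l.filter (fun r => decide (key r = k)) ++
        PySem.List.sorted (l.filter (fun r => decide (key r ≠ k))) key false := by
  induction l using List.reverseRecOn with
  | nil => simp
  | append_singleton l' x ih =>
    have hk' : ∀ r ∈ l', k ≤ key r := fun r hr => hk r (by simp [hr])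
    have hkx : k ≤ key x := hk x (by simp)
    rw [sorted_snoc, ih hk']
    by_cases hx : key x = k
    · have hpre : ∀ a ∈ l'.filter (fun r => decide (key r = k)),
          (fun a b => decide (key a < key b)) x a = false := by
        intro a ha
        have := (List.mem_filter.mp ha).2
        simp at this
        simp [hx, this]
      rw [insertBy_append_of_not_before _ _ _ _ hpre]
      have hsuf : ∀ b ∈ PySem.List.sorted (l'.filter (fun r => decide (key r ≠ k))) key false,
          (fun a b => decide (key a < key b)) x b = true := by
        intro b hb
        have hb' := (PySem.List.mem_sorted _ _ _ _).mp hb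
        have h1 := hk' b (List.mem_filter.mp hb').1
        have h2 := (List.mem_filter.mp hb').2
        simp at h2
        simp [hx]
        omega
      rw [insertBy_all_before _ _ _ hsuf]
      simp [List.filter_append, hx]
    · have hpre : ∀ a ∈ l'.filter (fun r => decide (key r = k)),
          (fun a b => decide (key a < key b)) x a = false := by
        intro a ha
        have := (List.mem_filter.mp ha).2
        simp at this
        simp [this]
        omega
      rw [insertBy_append_of_not_before _ _ _ _ hpre, ← sorted_snoc]
      simp [List.filter_append, hx]

theorem outerA_sorted : ∀ (fuel : Nat) (k : Int) (cur acc : List (List Int)),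
    (∀ r ∈ cur, k ≤ cntA r) → (∀ r ∈ cur, cntA r < k + fuel) →
    outerA fuel k cur acc = acc ++ PySem.List.sorted cur cntA false := by
  intro fuel
  induction fuel with
  | zero =>
    intro k cur acc hlo hhi
    have : cur = [] := by
      cases cur with
      | nil => rfl
      | cons r _ =>
        have h1 := hlo r (by simp)
        have h2 := hhi r (by simp)
        simp at h2; omega
    subst this; simp [outerA, PySem.List.sorted]
  | succ fuel ih =>
    intro k cur acc hlo hhi
    by_cases hcur : cur = []
    · subst hcur; simp [outerA, PySem.List.sorted]
    · rw [outerA, if_neg hcur, passA_eq]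
      have hlo' : ∀ r ∈ cur.filter (fun r => decide (cntA r ≠ k)), k + 1 ≤ cntA r := by
        intro r hr
        have h1 := hlo r (List.mem_filter.mp hr).1
        have h2 := (List.mem_filter.mp hr).2
        simp at h2; omega
      have hhi' : ∀ r ∈ cur.filter (fun r => decide (cntA r ≠ k)), cntA r < (k + 1) + fuel := by
        intro r hr
        have := hhi r (List.mem_filter.mp hr).1
        push_cast at this ⊢; omega
      rw [ih (k + 1) _ _ hlo' hhi']
      rw [sorted_min_split cntA k cur hlo]
      simp

theorem le_foldl_maxlen : ∀ (l : List (List Int)) (init : Nat),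
    init ≤ l.foldl (fun m r => max m r.length) init := by
  intro l
  induction l with
  | nil => intro _; simp
  | cons a l' ih => intro init; exact le_trans (le_max_left _ _) (ih _)

theorem foldl_max_len : ∀ (l : List (List Int)) (init : Nat) (r : List Int), r ∈ l →
    r.length ≤ l.foldl (fun m r => max m r.length) init := by
  intro l
  induction l with
  | nil => intro _ _ h; simp at h
  | cons a l' ih =>
    intro init r hr
    rcases List.mem_cons.mp hr with h | h
    · subst h
      simp only [List.foldl]
      exact le_trans (le_max_right init _) (le_foldl_maxlen l' _)
    · exact ih _ r h

-- ===== VERDICT (by name: the statement is the Claim_ definition above) =====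
theorem odr_mat_spec : Claim_equal_odr_mat := by
  intro mtrx _
  unfold Spec_odr_mat odr_mat odr_mat_alt
  have hlzc : lzcB = cntA := funext lzcB_eq
  rw [hlzc]
  rw [outerA_sorted _ 0 mtrx [] (fun r _ => cntA_nonneg r)
      (fun r hr => by
        have h1 := cntA_le_length r
        have h2 := foldl_max_len mtrx 0 r hr
        push_cast
        omega)]
  simp
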